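-- pv_equiv track=rewrite | github.com/maks1makrov/repeat | hw3.py | semi_perfekt_digits
-- ===== SOURCE A (Python) =====
-- def semi_perfekt_digits(digit):
--     reselt = []
--     for div in range(1, digit+1):
--         total = 0
--         for i in range(1, div):
--             if not div % i:
--                 total += i
--                 if total >= div:
--                     reselt.append(div)
--                     break
--     return reselt
-- ===== SOURCE B (Python) =====
-- def semi_perfekt_digits(digit):
--     sums = {}
--     for i in range(1, digit + 1):
--         for j in range(2 * i, digit + 1, i):
--             sums[j] = sums.get(j, 0) + i
--     return [d for d in range(1, digit + 1) if sums.get(d, 0) >= d]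
-- ===== Notes on version B (the rewrite author's own statement) =====
-- stated objective: faster
-- what changed: Replaced A's per-number trial division over range(1, div) (with an early break) by a single divisor-sum sieve that adds each i to sums[j] for every multiple j of i, then collects the d with sums.get(d, 0) >= d.
import Mathlib
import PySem

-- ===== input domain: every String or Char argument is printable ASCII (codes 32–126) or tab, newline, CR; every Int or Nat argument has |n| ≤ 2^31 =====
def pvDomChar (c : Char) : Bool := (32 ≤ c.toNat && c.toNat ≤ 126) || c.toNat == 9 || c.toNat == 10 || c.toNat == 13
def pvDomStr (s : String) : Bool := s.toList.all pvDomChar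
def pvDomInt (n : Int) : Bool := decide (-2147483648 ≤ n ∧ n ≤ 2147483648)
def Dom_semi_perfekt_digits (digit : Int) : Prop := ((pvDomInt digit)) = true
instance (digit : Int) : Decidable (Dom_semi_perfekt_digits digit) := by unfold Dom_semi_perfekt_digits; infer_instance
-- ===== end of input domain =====

-- B replaces A's quadratic per-number trial division by a single divisor-sum sieve
-- (accumulate each i into sums[j] for all multiples j of i), then collects; equivalence of the return values is proved below.

-- ===== PORT A =====
-- inner 'for i in range(1, div)' loop of A, with its running total and early break
def pvInnerA (div : Int) : List Int → Int → Bool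
  | [], _ => false
  | i :: rest, total =>
    if PySem.Int.mod div i = 0 then
      if div ≤ total + i then true
      else pvInnerA div rest (total + i)
    else pvInnerA div rest total

def semi_perfekt_digits (digit : Int) : List Int :=
  (PySem.List.pyRange 1 (digit + 1)).foldl
    (fun reselt div =>
      if pvInnerA div (PySem.List.pyRange 1 div) 0 then reselt ++ [div] else reselt) []

-- ===== PORT B =====
-- 'for j in range(2*i, digit+1, i): sums[j] = sums.get(j, 0) + i'
def pvSieveInner (digit i : Int) (d : PySem.Dict Int Int) : PySem.Dict Int Int :=
  (PySem.List.pyRange (2 * i) (digit + 1) i).foldl (fun d j => d.insert j (d.getD j 0 + i)) d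

def pvSieve (digit : Int) : PySem.Dict Int Int :=
  (PySem.List.pyRange 1 (digit + 1)).foldl (fun d i => pvSieveInner digit i d) PySem.Dict.empty

def semi_perfekt_digits_alt (digit : Int) : List Int :=
  let sums := pvSieve digit
  (PySem.List.pyRange 1 (digit + 1)).filter (fun d => decide (d ≤ sums.getD d 0))

-- ===== PRECONDITION & SPEC =====
def Spec_semi_perfekt_digits (digit : Int) (out : List Int) : Prop := out = semi_perfekt_digits_alt digit
instance (digit : Int) (out : List Int) : Decidable (Spec_semi_perfekt_digits digit out) := by unfold Spec_semi_perfekt_digits; infer_instance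

-- ===== CLAIM (what is proved, stated in full; the proofs are below) =====
def Claim_equal_semi_perfekt_digits : Prop := ∀ (digit : Int), Dom_semi_perfekt_digits digit → Spec_semi_perfekt_digits digit (semi_perfekt_digits digit)

-- ===== LEMMAS AND PROOFS =====

-- the sum of proper divisors of v, as both programs effectively compute it
def pvProperSum (v : Int) : Int :=
  ((PySem.List.pyRange 1 v).filter (fun i => decide (PySem.Int.mod v i = 0))).sum

lemma pvSum_map_ite_self (p : Int → Prop) [DecidablePred p] (l : List Int) :
    (l.map (fun x => if p x then x else 0)).sum = (l.filter (fun x => decide (p x))).sum := by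
  induction l with
  | nil => rfl
  | cons x xs ih =>
    by_cases h : p x <;> simp [h, ih]

-- A's inner loop: with a positive gap to div and nonnegative candidates, the early
-- break fires iff the full proper-divisor sum reaches div
lemma pvInnerA_eq (div : Int) (l : List Int) :
    ∀ total : Int, total < div → (∀ i ∈ l, 0 ≤ i) →
    pvInnerA div l total =
      decide (div ≤ total + (l.filter (fun i => decide (PySem.Int.mod div i = 0))).sum) := by
  induction l with
  | nil =>
    intro total hlt _
    simp only [List.filter_nil, List.sum_nil, add_zero]
    have h : pvInnerA div [] total = false := rfl
    rw [h, eq_comm, decide_eq_false_iff_not]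
    omega
  | cons i rest ih =>
    intro total hlt hpos
    have hposr : ∀ x ∈ rest, 0 ≤ x := fun x hx => hpos x (List.mem_cons_of_mem _ hx)
    by_cases hm : PySem.Int.mod div i = 0
    · rw [List.filter_cons_of_pos (by simp [hm]), List.sum_cons]
      by_cases hle : div ≤ total + i
      · have hrest : 0 ≤ (rest.filter (fun i => decide (PySem.Int.mod div i = 0))).sum :=
          List.sum_nonneg (fun x hx => hposr x (List.mem_of_mem_filter hx))
        have h2 : div ≤ total + (i + (rest.filter (fun i => decide (PySem.Int.mod div i = 0))).sum) := by
          omega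
        simp [pvInnerA, hm, hle, h2]
      · have h0 : pvInnerA div (i :: rest) total = pvInnerA div rest (total + i) := by
          simp [pvInnerA, hm, hle]
        rw [h0, ih (total + i) (by omega) hposr, add_assoc]
    · have h0 : pvInnerA div (i :: rest) total = pvInnerA div rest total := by
        simp [pvInnerA, hm]
      rw [List.filter_cons_of_neg (by simp [hm]), h0, ih total hlt hposr]

-- A returns exactly the d in [1, digit] with pvProperSum d ≥ d
lemma pvA_eq_filter (digit : Int) :
    semi_perfekt_digits digit =
      (PySem.List.pyRange 1 (digit + 1)).filter (fun d => decide (d ≤ pvProperSum d)) := by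
  unfold semi_perfekt_digits
  rw [PySem.List.foldl_congr_mem _ _
    (fun reselt div => if decide (div ≤ pvProperSum div) = true then reselt ++ [div] else reselt) []
    ?_]
  · exact PySem.List.foldl_append_if_eq_filter _ _ []
  · intro acc x hx
    have hx1 : (1 : Int) ≤ x ∧ x < digit + 1 := PySem.List.mem_pyRange_one.mp hx
    have h : pvInnerA x (PySem.List.pyRange 1 x) 0 = decide (x ≤ pvProperSum x) := by
      rw [pvInnerA_eq x (PySem.List.pyRange 1 x) 0 (by omega)
        (fun i hi => by have := PySem.List.mem_pyRange_one.mp hi; omega), zero_add]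
      rfl
    rw [h]

-- nodup of a positive-step range
lemma pvNodup_pyRange_pos (a b s : Int) (hs : 0 < s) : (PySem.List.pyRange a b s).Nodup := by
  rw [PySem.List.pyRange_of_pos a b hs]
  exact List.Nodup.map (fun x y hxy => by
    have h1 : s * (x : Int) = s * (y : Int) := add_left_cancel hxy
    have h2 := mul_left_cancel₀ (by omega : (s : Int) ≠ 0) h1
    exact_mod_cast h2) List.nodup_range

-- one pass of the inner sieve loop adds i to key v iff v is in the multiples list
lemma pvSieveStep (i : Int) (js : List Int) (hnd : js.Nodup) :
    ∀ (d : PySem.Dict Int Int) (v : Int),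
      ((js.foldl (fun d j => d.insert j (d.getD j 0 + i)) d).getD v 0) =
        d.getD v 0 + (if v ∈ js then i else 0) := by
  induction js with
  | nil => intro d v; simp
  | cons j rest ih =>
    intro d v
    have hnr : rest.Nodup := hnd.of_cons
    have hjr : j ∉ rest := (List.nodup_cons.mp hnd).1
    simp only [List.foldl_cons, ih hnr]
    by_cases hv : v = j
    · subst hv
      rw [PySem.Dict.getD_insert_self, if_neg hjr, if_pos List.mem_cons_self]
      ring
    · rw [PySem.Dict.getD_insert_of_ne _ _ _ hv]
      congr 1
      simp [List.mem_cons, hv]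

-- the sieve's entry at v is the sum of the i whose multiples list hits v
lemma pvSieve_getD (digit : Int) (l : List Int) :
    ∀ (d : PySem.Dict Int Int) (v : Int), (∀ i ∈ l, 0 < i) →
      ((l.foldl (fun d i => pvSieveInner digit i d) d).getD v 0) =
        d.getD v 0 +
          (l.map (fun i => if v ∈ PySem.List.pyRange (2 * i) (digit + 1) i then i else 0)).sum := by
  induction l with
  | nil => intro d v _; simp
  | cons i rest ih =>
    intro d v hpos
    simp only [List.foldl_cons, List.map_cons, List.sum_cons]
    rw [ih _ v (fun x hx => hpos x (List.mem_cons_of_mem _ hx))]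
    unfold pvSieveInner
    rw [pvSieveStep i _ (pvNodup_pyRange_pos _ _ _ (hpos i (List.mem_cons_self))) d v]
    ring

-- for 1 ≤ v ≤ digit the sieve's entry at v is the proper-divisor sum of v
lemma pvSieve_eq_properSum (digit v : Int) (h1 : 1 ≤ v) (h2 : v ≤ digit) :
    (pvSieve digit).getD v 0 = pvProperSum v := by
  unfold pvSieve
  rw [pvSieve_getD digit _ PySem.Dict.empty v
    (fun i hi => by have := PySem.List.mem_pyRange_one.mp hi; omega)]
  have hmem : ∀ i : Int, 0 < i →
      (v ∈ PySem.List.pyRange (2 * i) (digit + 1) i ↔ 2 * i ≤ v ∧ v < digit + 1 ∧ i ∣ v) := by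
    intro i hi
    rw [PySem.List.mem_pyRange_iff_of_pos hi]
    constructor
    · rintro ⟨ha, hb, hc⟩
      refine ⟨ha, hb, ?_⟩
      have : i ∣ (v - 2 * i) + 2 * i := dvd_add hc ⟨2, by ring⟩
      simpa using this
    · rintro ⟨ha, hb, hc⟩
      exact ⟨ha, hb, (dvd_sub_right hc).mpr ⟨2, by ring⟩⟩
  rw [PySem.List.pyRange_one_append 1 v (digit + 1) h1 (by omega), List.map_append,
    List.sum_append]
  have hz : ((PySem.List.pyRange v (digit + 1)).map
      (fun i => if v ∈ PySem.List.pyRange (2 * i) (digit + 1) i then i else 0)).sum = 0 := by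
    apply List.sum_eq_zero
    intro x hx
    simp only [List.mem_map] at hx
    obtain ⟨i, hi, rfl⟩ := hx
    have hiv := PySem.List.mem_pyRange_one.mp hi
    rw [if_neg]
    intro hmem'
    have := (hmem i (by omega)).mp hmem'
    omega
  rw [hz, add_zero]
  have hcong : ((PySem.List.pyRange 1 v).map
      (fun i => if v ∈ PySem.List.pyRange (2 * i) (digit + 1) i then i else 0)) =
      ((PySem.List.pyRange 1 v).map (fun i => if i ∣ v then i else 0)) := by
    apply List.map_congr_left
    intro i hi
    have hiv := PySem.List.mem_pyRange_one.mp hi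
    by_cases hd : i ∣ v
    · have h2i : 2 * i ≤ v := by
        obtain ⟨k, hk⟩ := hd
        have hk2 : 2 ≤ k := by nlinarith
        calc 2 * i = i * 2 := by ring
          _ ≤ i * k := by apply mul_le_mul_of_nonneg_left hk2 (by omega)
          _ = v := hk.symm
      rw [if_pos ((hmem i (by omega)).mpr ⟨h2i, by omega, hd⟩), if_pos hd]
    · rw [if_neg (fun hmem' => hd ((hmem i (by omega)).mp hmem').2.2), if_neg hd]
  rw [hcong, pvSum_map_ite_self (fun i => i ∣ v)]
  have he : (PySem.Dict.empty : PySem.Dict Int Int).getD v 0 = 0 := rfl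
  rw [he, zero_add]
  unfold pvProperSum
  exact congrArg List.sum (List.filter_congr (fun x _ => by
    simp [PySem.Int.mod_eq_zero_iff_dvd]))

lemma pvB_eq_filter (digit : Int) :
    semi_perfekt_digits_alt digit =
      (PySem.List.pyRange 1 (digit + 1)).filter (fun d => decide (d ≤ pvProperSum d)) := by
  unfold semi_perfekt_digits_alt
  apply List.filter_congr
  intro x hx
  have hx1 := PySem.List.mem_pyRange_one.mp hx
  rw [pvSieve_eq_properSum digit x (by omega) (by omega)]

-- ===== VERDICT (by name: the statement is the Claim_ definition above) =====
theorem semi_perfekt_digits_spec : Claim_equal_semi_perfekt_digits := by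
  intro digit _
  unfold Spec_semi_perfekt_digits
  rw [pvA_eq_filter, pvB_eq_filter]
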